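-- pv_equiv track=rewrite | github.com/MDAUBEITEMANYA/Homework | interview/three.py | find_characters_least_one
-- ===== SOURCE A (Python) =====
-- from typing import List
--
-- def find_characters_least_one(my_strings: List[str]):
--     character_list = []
--     for i in my_strings:
--         for j in i:
--             character_list.append(j)
--     character_list = list(set(character_list))
--     character_list.sort()
--     return character_list
-- ===== SOURCE B (Python) =====
-- def find_characters_least_one(my_strings):
--     all_chars = sorted(c for s in my_strings for c in s)
--     result = []
--     for c in all_chars:
--         if not result or result[-1] != c:
--             result.append(c)
--     return result
-- ===== Notes on version B (the rewrite author's own statement) =====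
-- stated objective: alternative
-- what changed: A dedupes with a set and then sorts the unique characters; B sorts the full flattened character list first and removes adjacent duplicates in one linear scan.
import Mathlib
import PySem

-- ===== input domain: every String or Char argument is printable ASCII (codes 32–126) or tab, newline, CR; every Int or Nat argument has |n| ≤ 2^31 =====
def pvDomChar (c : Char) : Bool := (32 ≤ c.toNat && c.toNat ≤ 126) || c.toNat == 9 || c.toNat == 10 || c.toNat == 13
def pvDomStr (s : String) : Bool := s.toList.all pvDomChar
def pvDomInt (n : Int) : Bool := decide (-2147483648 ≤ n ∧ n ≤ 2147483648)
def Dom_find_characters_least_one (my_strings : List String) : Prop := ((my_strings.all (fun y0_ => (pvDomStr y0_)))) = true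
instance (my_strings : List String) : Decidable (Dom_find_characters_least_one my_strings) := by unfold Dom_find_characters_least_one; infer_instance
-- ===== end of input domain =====

-- B replaces A's dedupe-with-a-set-then-sort by sort-everything-then-drop-adjacent-duplicates (alternative decomposition, same result).

-- ===== PORT A =====
-- for i in my_strings: for j in i: character_list.append(j); then list(set(...)); then .sort()
def find_characters_least_one (my_strings : List String) : List String :=
  let character_list : List String :=
    my_strings.foldl (fun acc s =>
      s.toList.foldl (fun acc2 c => acc2 ++ [String.mk [c]]) acc) []
  let character_list := PySem.Set.ofList character_list
  PySem.List.sorted character_list (fun x => x) false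

-- ===== PORT B =====
-- all_chars = sorted(flattened chars); then one pass keeping a char only when it differs from the last kept one
def find_characters_least_one_alt (my_strings : List String) : List String :=
  let all_chars : List String :=
    PySem.List.sorted
      (my_strings.foldl (fun acc s => acc ++ s.toList.map (fun c => String.mk [c])) [])
      (fun x => x) false
  all_chars.foldl (fun result c =>
    if result = [] ∨ result.getLast? ≠ some c then result ++ [c] else result) []

-- ===== PRECONDITION & SPEC =====
def Spec_find_characters_least_one (my_strings : List String) (out : List String) : Prop := out = find_characters_least_one_alt my_strings
instance (my_strings : List String) (out : List String) : Decidable (Spec_find_characters_least_one my_strings out) := by unfold Spec_find_characters_least_one; infer_instance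

-- ===== CLAIM (what is proved, stated in full; the proofs are below) =====
def Claim_equal_find_characters_least_one : Prop := ∀ (my_strings : List String), Dom_find_characters_least_one my_strings → Spec_find_characters_least_one my_strings (find_characters_least_one my_strings)

-- ===== LEMMAS AND PROOFS =====

-- the two flattening folds build the same list of one-character strings
theorem pv_flatten_eq (my_strings : List String) (acc : List String) :
    my_strings.foldl (fun acc s =>
      s.toList.foldl (fun acc2 c => acc2 ++ [String.mk [c]]) acc) acc
    = my_strings.foldl (fun acc s => acc ++ s.toList.map (fun c => String.mk [c])) acc := by
  induction my_strings generalizing acc with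
  | nil => rfl
  | cons s rest ih =>
      simp only [List.foldl_cons, PySem.List.foldl_append_singleton_eq_map]

-- in a strictly increasing list, the last element bounds every element
theorem pv_le_getLast {α : Type} [LinearOrder α] (l : List α) (m : α)
    (hp : l.Pairwise (· < ·)) (hm : l.getLast? = some m) : ∀ a ∈ l, a ≤ m := by
  induction l with
  | nil => simp at hm
  | cons x t ih =>
      intro a ha
      cases t with
      | nil =>
          simp at hm ha; simp [ha, hm]
      | cons y t' =>
          rw [List.getLast?_cons_cons] at hm
          rcases List.mem_cons.mp ha with rfl | ha
          · have hmem : m ∈ y :: t' := List.mem_of_getLast? hm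
            exact le_of_lt ((List.pairwise_cons.mp hp).1 m hmem)
          · exact ih (List.pairwise_cons.mp hp).2 hm a ha

-- invariant of B's adjacent-dedup fold over a ≤-sorted list
theorem pv_dedup_fold {α : Type} [LinearOrder α] [DecidableEq α] :
    ∀ (xs acc : List α), xs.Pairwise (· ≤ ·) → acc.Pairwise (· < ·) →
    (∀ a ∈ acc, ∀ b ∈ xs, a ≤ b) →
    (xs.foldl (fun result c =>
        if result = [] ∨ result.getLast? ≠ some c then result ++ [c] else result) acc).Pairwise (· < ·)
    ∧ ∀ y, y ∈ xs.foldl (fun result c =>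
        if result = [] ∨ result.getLast? ≠ some c then result ++ [c] else result) acc
        ↔ (y ∈ acc ∨ y ∈ xs) := by
  intro xs
  induction xs with
  | nil => intro acc _ hacc _; simpa using hacc
  | cons c rest ih =>
      intro acc hxs hacc hle
      have hxs' : rest.Pairwise (· ≤ ·) := (List.pairwise_cons.mp hxs).2
      have hcrest : ∀ b ∈ rest, c ≤ b := (List.pairwise_cons.mp hxs).1
      simp only [List.foldl_cons]
      by_cases hcond : acc = [] ∨ acc.getLast? ≠ some c
      · rw [if_pos hcond]
        have hlt : ∀ a ∈ acc, a < c := by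
          intro a ha
          rcases hcond with h0 | hne
          · subst h0; simp at ha
          · have hane : acc ≠ [] := by rintro rfl; simp at ha
            obtain ⟨m, hm⟩ := List.getLast?_isSome.mpr hane |> Option.isSome_iff_exists.mp
            have ham : a ≤ m := pv_le_getLast acc m hacc hm a ha
            have hmc : m ≤ c := hle m (List.mem_of_getLast? hm) c (List.mem_cons_self ..)
            have : m ≠ c := by intro h; exact hne (h ▸ hm)
            exact lt_of_le_of_lt ham (lt_of_le_of_ne hmc this)
        have hacc' : (acc ++ [c]).Pairwise (· < ·) := by
          rw [List.pairwise_append]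
          exact ⟨hacc, List.pairwise_singleton _ _, by intro a ha b hb; simp at hb; subst hb; exact hlt a ha⟩
        have hle' : ∀ a ∈ acc ++ [c], ∀ b ∈ rest, a ≤ b := by
          intro a ha b hb
          rcases List.mem_append.mp ha with ha | ha
          · exact hle a ha b (List.mem_cons_of_mem _ hb)
          · simp at ha; subst ha; exact hcrest b hb
        obtain ⟨h1, h2⟩ := ih (acc ++ [c]) hxs' hacc' hle'
        refine ⟨h1, fun y => ?_⟩
        rw [h2 y]; simp [List.mem_append]; tauto
      · rw [if_neg hcond]
        push_neg at hcond
        have hcmem : c ∈ acc := List.mem_of_getLast? hcond.2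
        have hle' : ∀ a ∈ acc, ∀ b ∈ rest, a ≤ b :=
          fun a ha b hb => hle a ha b (List.mem_cons_of_mem _ hb)
        obtain ⟨h1, h2⟩ := ih acc hxs' hacc hle'
        refine ⟨h1, fun y => ?_⟩
        rw [h2 y]
        constructor
        · tauto
        · rintro (hy | hy) <;> simp_all
          rcases hy with rfl | hy
          · exact Or.inl hcmem
          · exact Or.inr hy

-- ===== VERDICT (by name: the statement is the Claim_ definition above) =====
theorem find_characters_least_one_spec : Claim_equal_find_characters_least_one := by
  intro my_strings _
  unfold Spec_find_characters_least_one find_characters_least_one find_characters_least_one_alt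
  simp only [pv_flatten_eq]
  set flat := my_strings.foldl (fun acc s => acc ++ s.toList.map (fun c => String.mk [c])) [] with hflat
  set srt := PySem.List.sorted flat (fun x => x) false with hsrt
  have hpw : srt.Pairwise (· ≤ ·) := PySem.List.sorted_pairwise flat (fun x => x) ..
  obtain ⟨hB1, hB2⟩ := pv_dedup_fold srt [] hpw (List.Pairwise.nil) (by simp)
  set B := srt.foldl (fun result c =>
      if result = [] ∨ result.getLast? ≠ some c then result ++ [c] else result) [] with hB
  have hBnodup : B.Nodup := hB1.imp (fun h => ne_of_lt h)
  have hmemB : ∀ y, y ∈ B ↔ y ∈ flat := by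
    intro y; rw [hB2 y]; simp [hsrt, PySem.List.mem_sorted]
  have hperm : B.Perm (PySem.Set.ofList flat) := by
    rw [List.perm_ext_iff_of_nodup hBnodup (PySem.Set.nodup_ofList flat)]
    intro y; rw [hmemB y, PySem.Set.mem_ofList]
  exact PySem.List.sorted_eq_of_perm_of_pairwise_lt _ _ (fun x => x) hperm hB1
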